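-- pv_equiv track=rewrite | github.com/hatching/vmcloak | vmcloak/install.py | parse_dependencies_list
-- ===== SOURCE A (Python) =====
-- def _split_dep_version(dep):
--     if ":" not in dep:
--         return dep, None
--
--     dependencency, version = dep.split(":", 1)
--     return dependencency.strip(), version.strip()
--
-- def parse_dependencies_list(dependencies):
--     """Read all key=value settings and dependencies, and versions from the
--     dependencies string list. Return a list of (dep,version) entries
--     and a settings dictionary."""
--     deps_versions = []
--     settings = {}
--     settings_versions = []
--     for dependency in dependencies:
--         if "." in dependency and "=" in dependency:
--             key, value = dependency.split("=", 1)
--             # Store the value if it is a version. We do this so we can later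
--             # merge these with the deps:versions given in another format.
--             if key.endswith(".version"):
--                 depname, _ = key.split(".", 1)
--                 settings_versions.append((depname.strip(), value.strip()))
--             else:
--                 settings[key.strip()] = value.strip()
--         else:
--             deps_versions.append(_split_dep_version(dependency))
--
--     # Replace dep,None with the version for the deps given as a settings
--     # string instead of dep:version format.
--     for dep, version in settings_versions:
--         try:
--             i = deps_versions.index((dep, None))
--         except ValueError:
--             continue
--
--         deps_versions.pop(i)
--         deps_versions.insert(i, (dep, version))
--
--     return deps_versions, settings
-- ===== SOURCE B (Python) =====
-- def parse_dependencies_list(dependencies):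
--     """Read all key=value settings and dependencies, and versions from the
--     dependencies string list. Return a list of (dep,version) entries
--     and a settings dictionary."""
--     raw = []
--     settings = {}
--     pending = {}  # dep -> FIFO queue of versions given in settings format
--     for dependency in dependencies:
--         if "." in dependency and "=" in dependency:
--             key, value = dependency.split("=", 1)
--             if key.endswith(".version"):
--                 depname = key.split(".", 1)[0]
--                 pending.setdefault(depname.strip(), []).append(value.strip())
--             else:
--                 settings[key.strip()] = value.strip()
--         else:
--             if ":" in dependency:
--                 name, version = dependency.split(":", 1)
--                 raw.append((name.strip(), version.strip()))
--             else:
--                 raw.append((dependency, None))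
--
--     # Single pass: each (dep, None) takes the next queued version for dep.
--     deps_versions = []
--     for dep, version in raw:
--         if version is None:
--             queue = pending.get(dep, [])
--             if queue:
--                 version = queue.pop(0)
--         deps_versions.append((dep, version))
--     return deps_versions, settings
-- ===== Notes on version B (the rewrite author's own statement) =====
-- stated objective: alternative
-- what changed: Replaced the repeated list.index/pop/insert merge loop (one scan of the dep list per settings version) by a dict of per-dep FIFO version queues built in the first pass, then one linear pass over the dep list that pops the next queued version at each (dep, None) entry.
import Mathlib
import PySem

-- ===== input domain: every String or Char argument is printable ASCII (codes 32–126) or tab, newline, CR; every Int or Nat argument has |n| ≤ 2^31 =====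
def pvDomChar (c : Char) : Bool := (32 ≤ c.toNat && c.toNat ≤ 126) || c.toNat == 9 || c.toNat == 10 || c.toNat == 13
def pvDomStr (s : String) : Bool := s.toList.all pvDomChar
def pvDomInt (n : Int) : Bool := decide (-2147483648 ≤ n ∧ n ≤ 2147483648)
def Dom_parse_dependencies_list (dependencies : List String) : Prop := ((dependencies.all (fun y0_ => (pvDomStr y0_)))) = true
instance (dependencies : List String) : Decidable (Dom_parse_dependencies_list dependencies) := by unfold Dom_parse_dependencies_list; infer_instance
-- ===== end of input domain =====

-- B replaces A's merge loop (list.index/pop/insert once per settings version) by a dict of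
-- per-dep FIFO version queues and one linear pass over the dep list (objective: alternative).

-- ===== PORT A =====

def splitDepVersion (dep : String) : String × Option String :=
  if PySem.Str.isIn ":" dep = false then (dep, none)
  else
    match PySem.Str.splitMax? dep ":" 1 with
    | some (d :: v :: _) => (PySem.Str.strip d, some (PySem.Str.strip v))
    | _ => (dep, none)  -- unreachable: ":" ∈ dep gives exactly two pieces

def aStep (st : List (String × Option String) × PySem.Dict String String × List (String × String))
    (dependency : String) :
    List (String × Option String) × PySem.Dict String String × List (String × String) :=
  let (deps_versions, settings, settings_versions) := st
  if PySem.Str.isIn "." dependency && PySem.Str.isIn "=" dependency then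
    match PySem.Str.splitMax? dependency "=" 1 with
    | some (key :: value :: _) =>
      if PySem.Str.endswith key ".version" then
        match PySem.Str.splitMax? key "." 1 with
        | some (depname :: _) =>
            (deps_versions, settings,
             settings_versions ++ [(PySem.Str.strip depname, PySem.Str.strip value)])
        | _ => st  -- unreachable
      else (deps_versions, settings.insert (PySem.Str.strip key) (PySem.Str.strip value),
            settings_versions)
    | _ => st  -- unreachable: "=" ∈ dependency gives exactly two pieces
  else (deps_versions ++ [splitDepVersion dependency], settings, settings_versions)

-- deps_versions.index((dep, None)); pop(i); insert(i, (dep, version)) — ValueError → unchanged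
def applyOne (l : List (String × Option String)) (dep version : String) :
    List (String × Option String) :=
  match PySem.List.index? l (dep, none) with
  | none => l
  | some i =>
    match PySem.List.pop? l (i : Int) with
    | some (_, l') => PySem.List.insert l' (i : Int) (dep, some version)
    | none => l  -- unreachable

def parse_dependencies_list (dependencies : List String) :
    (List (String × Option String)) × (List (String × String)) :=
  let st := dependencies.foldl aStep ([], PySem.Dict.empty, [])
  (st.2.2.foldl (fun acc p => applyOne acc p.1 p.2) st.1, st.2.1.items)

-- ===== PORT B =====

def bStep (st : List (String × Option String) × PySem.Dict String String ×
      PySem.Dict String (List String)) (dependency : String) :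
    List (String × Option String) × PySem.Dict String String × PySem.Dict String (List String) :=
  let (raw, settings, pending) := st
  if PySem.Str.isIn "." dependency && PySem.Str.isIn "=" dependency then
    match PySem.Str.splitMax? dependency "=" 1 with
    | some (key :: value :: _) =>
      if PySem.Str.endswith key ".version" then
        match PySem.Str.splitMax? key "." 1 with
        | some (depname :: _) =>
            let dn := PySem.Str.strip depname
            -- pending.setdefault(dn, []).append(value.strip())
            (raw, settings, pending.insert dn (pending.getD dn [] ++ [PySem.Str.strip value]))
        | _ => st  -- unreachable
      else (raw, settings.insert (PySem.Str.strip key) (PySem.Str.strip value), pending)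
    | _ => st  -- unreachable
  else
    if PySem.Str.isIn ":" dependency then
      match PySem.Str.splitMax? dependency ":" 1 with
      | some (nm :: v :: _) =>
          (raw ++ [(PySem.Str.strip nm, some (PySem.Str.strip v))], settings, pending)
      | _ => (raw ++ [(dependency, none)], settings, pending)  -- unreachable
    else (raw ++ [(dependency, none)], settings, pending)

-- each (dep, None) takes the next queued version for dep
def mergePass : List (String × Option String) → PySem.Dict String (List String) →
    List (String × Option String)
  | [], _ => []
  | (d, some v) :: t, q => (d, some v) :: mergePass t q
  | (d, none) :: t, q =>
    match q.getD d [] with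
    | v :: vs => (d, some v) :: mergePass t (q.insert d vs)
    | [] => (d, none) :: mergePass t q

def parse_dependencies_list_alt (dependencies : List String) :
    (List (String × Option String)) × (List (String × String)) :=
  let st := dependencies.foldl bStep ([], PySem.Dict.empty, PySem.Dict.empty)
  (mergePass st.1 st.2.2, st.2.1.items)

-- ===== PRECONDITION & SPEC =====
def Spec_parse_dependencies_list (dependencies : List String) (out : (List (String × Option String)) × (List (String × String))) : Prop := out = parse_dependencies_list_alt dependencies
instance (dependencies : List String) (out : (List (String × Option String)) × (List (String × String))) : Decidable (Spec_parse_dependencies_list dependencies out) := by unfold Spec_parse_dependencies_list; infer_instance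

-- ===== CLAIM (what is proved, stated in full; the proofs are below) =====
def Claim_equal_parse_dependencies_list : Prop := ∀ (dependencies : List String), Dom_parse_dependencies_list dependencies → Spec_parse_dependencies_list dependencies (parse_dependencies_list dependencies)

-- ===== LEMMAS AND PROOFS =====

-- the versions recorded for each dep by A's settings_versions list, in order
def versionsOf (sv : List (String × String)) : String → List String :=
  fun d => (sv.filter (fun p => p.1 == d)).map Prod.snd

-- lookup view of B's pending dict
def gammaQ (q : PySem.Dict String (List String)) : String → List String :=
  fun d => q.getD d []

-- mergePass with the dict abstracted to its lookup function
def mergeF : List (String × Option String) → (String → List String) →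
    List (String × Option String)
  | [], _ => []
  | (d, some v) :: t, f => (d, some v) :: mergeF t f
  | (d, none) :: t, f =>
    match f d with
    | v :: vs => (d, some v) :: mergeF t (Function.update f d vs)
    | [] => (d, none) :: mergeF t f

lemma versionsOf_nil : versionsOf [] = fun _ => [] := rfl

lemma versionsOf_append (sv : List (String × String)) (dn vv : String) :
    versionsOf (sv ++ [(dn, vv)]) =
      fun d => versionsOf sv d ++ (if dn = d then [vv] else []) := by
  funext d
  simp [versionsOf, List.filter_append]
  split_ifs with h <;> simp [h]

lemma versionsOf_cons (sv : List (String × String)) (dn vv : String) :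
    versionsOf ((dn, vv) :: sv) =
      Function.update (versionsOf sv) dn (vv :: versionsOf sv dn) := by
  funext d
  by_cases h : d = dn
  · subst h; simp [versionsOf, Function.update]
  · have h2 : (dn == d) = false := beq_eq_false_iff_ne.mpr (Ne.symm h)
    simp [versionsOf, Function.update, h, h2]

lemma gammaQ_insert (q : PySem.Dict String (List String)) (dn : String) (vs : List String) :
    gammaQ (q.insert dn vs) = Function.update (gammaQ q) dn vs := by
  funext d
  simp [gammaQ, PySem.Dict.getD_insert, Function.update]

lemma gammaQ_empty : gammaQ PySem.Dict.empty = fun _ => [] := by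
  funext d; simp [gammaQ]

lemma splitDep_else (dep : String) :
    (if PySem.Str.isIn ":" dep then
       match PySem.Str.splitMax? dep ":" 1 with
       | some (nm :: v :: _) => [(PySem.Str.strip nm, (some (PySem.Str.strip v) : Option String))]
       | _ => [(dep, (none : Option String))]
     else [(dep, (none : Option String))]) = [splitDepVersion dep] := by
  unfold splitDepVersion
  by_cases h : PySem.Str.isIn ":" dep
  · simp only [h, if_true]
    rcases PySem.Str.splitMax? dep ":" 1 with _ | (_ | ⟨x, _ | ⟨y, r⟩⟩) <;> rfl
  · have hf : PySem.Str.isIn ":" dep = false := by simpa using h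
    rw [hf]
    simp

-- one first-pass step preserves the simulation relation
lemma step_rel (dv : List (String × Option String)) (s : PySem.Dict String String)
    (sv : List (String × String)) (q : PySem.Dict String (List String)) (dep : String)
    (h : gammaQ q = versionsOf sv) :
    (bStep (dv, s, q) dep).1 = (aStep (dv, s, sv) dep).1 ∧
    (bStep (dv, s, q) dep).2.1 = (aStep (dv, s, sv) dep).2.1 ∧
    gammaQ (bStep (dv, s, q) dep).2.2 = versionsOf (aStep (dv, s, sv) dep).2.2 := by
  unfold aStep bStep
  by_cases hc : (PySem.Str.isIn "." dep && PySem.Str.isIn "=" dep) = true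
  · simp only [hc, if_true]
    match PySem.Str.splitMax? dep "=" 1 with
    | none => exact ⟨rfl, rfl, h⟩
    | some [] => exact ⟨rfl, rfl, h⟩
    | some [k] => exact ⟨rfl, rfl, h⟩
    | some (k :: v :: rest) =>
      by_cases he : PySem.Str.endswith k ".version"
      · simp only [he, if_true]
        match PySem.Str.splitMax? k "." 1 with
        | none => exact ⟨rfl, rfl, h⟩
        | some [] => exact ⟨rfl, rfl, h⟩
        | some (dn :: r) =>
          refine ⟨rfl, rfl, ?_⟩
          simp only [gammaQ_insert, versionsOf_append]
          funext d
          by_cases hd : d = PySem.Str.strip dn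
          · subst hd; simp [Function.update, ← h, gammaQ]
          · have hd2 : ¬PySem.Str.strip dn = d := fun hh => hd (Eq.symm hh)
            simp [Function.update, hd, hd2, ← h]
      · simp only [he]
        exact ⟨rfl, rfl, h⟩
  · simp only [hc, Bool.false_eq_true, if_false]
    have hsplit := splitDep_else dep
    by_cases h3 : PySem.Str.isIn ":" dep
    · simp only [h3, if_true] at hsplit ⊢
      rcases hm : PySem.Str.splitMax? dep ":" 1 with _ | (_ | ⟨x, _ | ⟨y, r⟩⟩) <;>
        rw [hm] at hsplit <;> exact ⟨by rw [← hsplit], rfl, h⟩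
    · simp only [h3, Bool.false_eq_true, if_false] at hsplit ⊢
      exact ⟨by rw [← hsplit], trivial, h⟩

lemma pass1 (deps : List String) :
    ∀ (dv : List (String × Option String)) (s : PySem.Dict String String)
      (sv : List (String × String)) (q : PySem.Dict String (List String)),
      gammaQ q = versionsOf sv →
      (deps.foldl bStep (dv, s, q)).1 = (deps.foldl aStep (dv, s, sv)).1 ∧
      (deps.foldl bStep (dv, s, q)).2.1 = (deps.foldl aStep (dv, s, sv)).2.1 ∧
      gammaQ (deps.foldl bStep (dv, s, q)).2.2 = versionsOf (deps.foldl aStep (dv, s, sv)).2.2 := by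
  induction deps with
  | nil => intro dv s sv q h; exact ⟨rfl, rfl, h⟩
  | cons dep rest ih =>
    intro dv s sv q h
    obtain ⟨h1, h2, h3⟩ := step_rel dv s sv q dep h
    have hstart : bStep (dv, s, q) dep =
        ((aStep (dv, s, sv) dep).1, (aStep (dv, s, sv) dep).2.1, (bStep (dv, s, q) dep).2.2) := by
      rw [← h1, ← h2]
    rw [List.foldl_cons, List.foldl_cons, hstart]
    exact ih (aStep (dv, s, sv) dep).1 (aStep (dv, s, sv) dep).2.1
      (aStep (dv, s, sv) dep).2.2 (bStep (dv, s, q) dep).2.2 h3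

lemma mergePass_eq_mergeF (l : List (String × Option String)) :
    ∀ q, mergePass l q = mergeF l (gammaQ q) := by
  induction l with
  | nil => intro q; rfl
  | cons hd t ih =>
    intro q
    match hd with
    | (d, some v) =>
      show (d, some v) :: mergePass t q = (d, some v) :: mergeF t (gammaQ q)
      exact congrArg _ (ih q)
    | (d, none) =>
      show (match q.getD d [] with
            | v :: vs => (d, some v) :: mergePass t (q.insert d vs)
            | [] => (d, none) :: mergePass t q) =
           (match gammaQ q d with
            | v :: vs => (d, some v) :: mergeF t (Function.update (gammaQ q) d vs)
            | [] => (d, none) :: mergeF t (gammaQ q))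
      have hgd : q.getD d [] = gammaQ q d := rfl
      rw [hgd]
      match gammaQ q d with
      | [] => exact congrArg _ (ih q)
      | v :: vs =>
        show (d, some v) :: mergePass t (q.insert d vs)
            = (d, some v) :: mergeF t (Function.update (gammaQ q) d vs)
        rw [ih (q.insert d vs), gammaQ_insert]

lemma applyOne_nil (d v : String) : applyOne [] d v = [] := by
  simp [applyOne, PySem.List.index?]

lemma insert_zero {α : Type} (xs : List α) (x : α) : PySem.List.insert xs 0 x = x :: xs := by
  simp [PySem.List.insert, PySem.List.sliceIndices]

lemma insert_succ_cons {α : Type} (h0 : α) (xs : List α) (i : Nat) (x : α) :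
    PySem.List.insert (h0 :: xs) ((i : Int) + 1) x = h0 :: PySem.List.insert xs (i : Int) x := by
  simp [PySem.List.insert, PySem.List.sliceIndices]
  rw [if_neg (by omega), if_neg (by omega)]
  have h1 : (min (i : Int) (xs.length : Int) + 1).toNat
      = (min (i : Int) (xs.length : Int)).toNat + 1 := by omega
  rw [h1]
  simp

lemma applyOne_cons_self (t : List (String × Option String)) (d v : String) :
    applyOne ((d, none) :: t) d v = (d, some v) :: t := by
  unfold applyOne
  rw [PySem.List.index?_cons_self]
  simp [PySem.List.pop?_zero_cons, insert_zero]

lemma applyOne_cons_ne (h0 : String × Option String) (t : List (String × Option String))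
    (d v : String) (hne : h0 ≠ (d, none)) :
    applyOne (h0 :: t) d v = h0 :: applyOne t d v := by
  unfold applyOne
  rw [PySem.List.index?_cons_of_ne t hne]
  match hidx : PySem.List.index? t (d, none) with
  | none => simp
  | some i =>
    obtain ⟨hk, hget, -⟩ := PySem.List.getElem_of_index?_eq_some hidx
    simp only [Option.map_some]
    have hcast : ((i + 1 : Nat) : Int) = (i : Int) + 1 := by push_cast; ring
    rw [PySem.List.pop?_natCast (h0 :: t) (i + 1) (by simpa using hk),
        PySem.List.pop?_natCast t i hk]
    simp only [List.eraseIdx_cons_succ]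
    rw [hcast, insert_succ_cons]

lemma mergeF_nilf (l : List (String × Option String)) : mergeF l (fun _ => []) = l := by
  induction l with
  | nil => rfl
  | cons hd t ih =>
    match hd with
    | (d, some v) => simp [mergeF, ih]
    | (d, none) => simp [mergeF, ih]

lemma mergeF_update (l : List (String × Option String)) :
    ∀ (f : String → List String) (d v : String),
      mergeF l (Function.update f d (v :: f d)) = mergeF (applyOne l d v) f := by
  induction l with
  | nil => intro f d v; rw [applyOne_nil]; rfl
  | cons hd t ih =>
    intro f d v
    match hd with
    | (d', some v') =>
      rw [applyOne_cons_ne _ _ _ _ (by simp)]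
      simp [mergeF, ih]
    | (d', none) =>
      by_cases hd : d' = d
      · subst hd
        rw [applyOne_cons_self]
        simp only [mergeF, Function.update_self]
        rw [Function.update_idem, Function.update_eq_self]
      · rw [applyOne_cons_ne _ _ _ _ (by simp [hd])]
        simp only [mergeF, Function.update_apply, if_neg hd]
        match hf : f d' with
        | [] => simp [ih]
        | v'' :: vs =>
          simp only [List.cons.injEq, true_and]
          rw [Function.update_comm (show d ≠ d' from fun hh => hd (Eq.symm hh))]
          have hfd : (Function.update f d' vs) d = f d := by
            simp [show ¬d = d' from fun h => hd (Eq.symm h)]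
          rw [← hfd, ih]

lemma foldl_applyOne (sv : List (String × String)) :
    ∀ (l : List (String × Option String)),
      sv.foldl (fun acc p => applyOne acc p.1 p.2) l = mergeF l (versionsOf sv) := by
  induction sv with
  | nil => intro l; rw [versionsOf_nil, mergeF_nilf]; rfl
  | cons p rest ih =>
    intro l
    match p with
    | (d, vv) =>
      simp only [List.foldl_cons]
      rw [ih (applyOne l d vv), versionsOf_cons, mergeF_update]

-- ===== VERDICT (by name: the statement is the Claim_ definition above) =====
theorem parse_dependencies_list_spec : Claim_equal_parse_dependencies_list := by
  intro deps _
  unfold Spec_parse_dependencies_list parse_dependencies_list parse_dependencies_list_alt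
  obtain ⟨h1, h2, h3⟩ := pass1 deps [] PySem.Dict.empty [] PySem.Dict.empty
    (by rw [gammaQ_empty, versionsOf_nil])
  simp only
  rw [h2, h1, mergePass_eq_mergeF, h3, foldl_applyOne]
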